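-- pv_equiv track=rewrite | github.com/JacobWren/CPE101 | ProblemSets/pset4.py | sum_mul_table
-- ===== SOURCE A (Python) =====
-- def sum_ints(start: int, stop: int, step: int) -> int:
--     if stop <= start:
--         return 0
--     sum = start - step
--     tot = 0
--     while start < stop:
--         sum = sum + step
--         tot = tot + sum
--         start = start + step
--     return tot
--
-- def sum_mul_table(max_int: int) -> int:
--     j = 1
--     i = 1
--     sum = 0
--     while j <= max_int:
--         k = (max_int * i) + 1
--         tot = sum_ints(j, k, i)
--         sum = sum + tot
--         j = j + 1
--         i = i + 1
--     return sum
-- ===== SOURCE B (Python) =====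
-- def sum_mul_table(max_int: int) -> int:
--     t = max_int if max_int > 0 else 0
--     s = t * (t + 1) // 2
--     return s * s
-- ===== Notes on version B (the rewrite author's own statement) =====
-- stated objective: faster
-- what changed: Replaced the nested loops summing the n-by-n multiplication table by the closed form (n(n+1)/2)^2.
import Mathlib
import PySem

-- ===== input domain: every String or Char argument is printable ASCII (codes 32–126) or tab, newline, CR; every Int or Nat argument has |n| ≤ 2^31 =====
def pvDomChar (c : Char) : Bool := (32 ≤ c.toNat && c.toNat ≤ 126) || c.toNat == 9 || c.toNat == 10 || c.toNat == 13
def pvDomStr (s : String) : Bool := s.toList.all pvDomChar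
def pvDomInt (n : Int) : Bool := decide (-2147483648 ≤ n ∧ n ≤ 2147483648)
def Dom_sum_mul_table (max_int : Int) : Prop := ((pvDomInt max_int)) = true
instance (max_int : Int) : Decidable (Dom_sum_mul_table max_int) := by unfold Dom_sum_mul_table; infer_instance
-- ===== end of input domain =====

-- B replaces A's O(n^2) nested summation loops by the closed form (n(n+1)/2)^2 (faster, asymptotic).

-- ===== PORT A =====
-- the 'while start < stop' loop of sum_ints; the '0 < step' guard only makes the
-- recursion total (Python diverges there; A only ever calls it with step ≥ 1)
def sumIntsLoop (sum tot start stop step : Int) : Int :=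
  if _h : start < stop ∧ 0 < step then
    sumIntsLoop (sum + step) (tot + (sum + step)) (start + step) stop step
  else tot
termination_by (stop - start).toNat
decreasing_by omega

def sum_ints (start stop step : Int) : Int :=
  if stop ≤ start then 0
  else sumIntsLoop (start - step) 0 start stop step

-- the 'while j <= max_int' loop of sum_mul_table
def smtLoop (j i sum max_int : Int) : Int :=
  if _h : j ≤ max_int then
    smtLoop (j + 1) (i + 1) (sum + sum_ints j (max_int * i + 1) i) max_int
  else sum
termination_by (max_int + 1 - j).toNat
decreasing_by omega

def sum_mul_table (max_int : Int) : Int := smtLoop 1 1 0 max_int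

-- ===== PORT B =====
def sum_mul_table_alt (max_int : Int) : Int :=
  let t : Int := if max_int > 0 then max_int else 0
  let s : Int := PySem.Int.floordiv (t * (t + 1)) 2
  s * s

-- ===== PRECONDITION & SPEC =====
def Spec_sum_mul_table (max_int : Int) (out : Int) : Prop := out = sum_mul_table_alt max_int
instance (max_int : Int) (out : Int) : Decidable (Spec_sum_mul_table max_int out) := by unfold Spec_sum_mul_table; infer_instance

-- ===== CLAIM =====
def Claim_equal_sum_mul_table : Prop := ∀ (max_int : Int), Dom_sum_mul_table max_int → Spec_sum_mul_table max_int (sum_mul_table max_int)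

-- ===== LEMMAS AND PROOFS =====
-- triangular numbers, recursively
def tri : Nat → Int
  | 0 => 0
  | m + 1 => tri m + (m + 1)

theorem two_mul_tri (m : Nat) : 2 * tri m = m * (m + 1) := by
  induction m with
  | zero => simp [tri]
  | succ k ih => simp [tri]; push_cast at ih ⊢; ring_nf; ring_nf at ih; omega

-- the inner loop sums an arithmetic progression: m iterations when
-- start + (m-1)*step < stop ≤ start + m*step
theorem sumIntsLoop_eq (m : Nat) : ∀ (sum tot start stop step : Int), 0 < step →
    start + m * step - step < stop → stop ≤ start + m * step →
    sumIntsLoop sum tot start stop step = tot + m * sum + step * tri m := by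
  induction m with
  | zero =>
    intro sum tot start stop step hs h1 h2
    rw [sumIntsLoop]
    simp only [Nat.cast_zero, zero_mul, add_zero] at h1 h2 ⊢
    rw [dif_neg (by omega)]
    simp [tri]
  | succ k ih =>
    intro sum tot start stop step hs h1 h2
    rw [sumIntsLoop]
    have hms : (0:Int) ≤ (k:Int) * step := by positivity
    rw [dif_pos (by push_cast at h1; constructor <;> nlinarith)]
    rw [ih (sum + step) (tot + (sum + step)) (start + step) stop step hs
        (by push_cast at h1; nlinarith) (by push_cast at h2; nlinarith)]
    simp [tri]; push_cast; ring

-- each outer-loop iteration contributes i * tri n  (with j = i, 1 ≤ i ≤ n)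
theorem sum_ints_row (n : Nat) (i : Int) (hi : 0 < i) (hn : 0 < n) :
    sum_ints i ((n:Int) * i + 1) i = i * tri n := by
  have hn1 : (1:Int) ≤ (n:Int) := by exact_mod_cast hn
  rw [sum_ints, if_neg (by nlinarith)]
  rw [sumIntsLoop_eq n (i - i) 0 i ((n:Int) * i + 1) i hi
      (by nlinarith) (by nlinarith)]
  simp

-- the outer loop, counting down remaining iterations m (j = n + 1 - m)
theorem smtLoop_eq (n : Nat) (m : Nat) (hm : m ≤ n) : ∀ (sum : Int),
    smtLoop ((n:Int) + 1 - m) ((n:Int) + 1 - m) sum n =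
      sum + (tri n - tri (n - m)) * tri n := by
  induction m with
  | zero => intro sum; rw [smtLoop]; rw [dif_neg (by omega)]; simp
  | succ k ih =>
    intro sum
    rw [smtLoop]
    rw [dif_pos (by push_cast; omega)]
    have hj : ((n:Int) + 1 - (k + 1 : Nat)) + 1 = (n:Int) + 1 - k := by push_cast; ring
    have hi0 : (0:Int) < (n:Int) + 1 - (k + 1 : Nat) := by
      push_cast; omega
    rw [sum_ints_row n _ hi0 (by omega)]
    rw [hj, ih (by omega)]
    have htr : tri (n - k) = tri (n - (k + 1)) + ((n:Int) + 1 - (k + 1 : Nat)) := by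
      have h : n - k = (n - (k + 1)) + 1 := by omega
      rw [h, tri]; push_cast; congr 1; omega
    rw [htr]; ring

theorem floordiv_tri (n : Nat) : PySem.Int.floordiv ((n:Int) * ((n:Int) + 1)) 2 = tri n := by
  rw [PySem.Int.floordiv_eq_iff_of_pos (by omega)]
  have h := two_mul_tri n
  omega

-- ===== VERDICT =====
theorem sum_mul_table_spec : Claim_equal_sum_mul_table := by
  unfold Claim_equal_sum_mul_table
  intro n _
  unfold Spec_sum_mul_table sum_mul_table sum_mul_table_alt
  by_cases hn : 0 < n
  · have hrep : n = ((n.toNat : Nat) : Int) := by omega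
    simp only [if_pos hn]
    rw [hrep]
    have h1 : ((n.toNat : Nat) : Int) + 1 - (n.toNat : Nat) = 1 := by ring
    have := smtLoop_eq n.toNat n.toNat (le_refl _) 0
    rw [h1] at this
    rw [this]
    have h0 : n.toNat - n.toNat = 0 := by omega
    rw [h0]
    rw [floordiv_tri n.toNat]
    simp [tri]
  · rw [smtLoop, dif_neg (by omega)]
    simp only [if_neg hn]
    norm_num [PySem.Int.floordiv]
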